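-- pv_equiv track=rewrite | github.com/mdicio/AutoDeep | autodeep/modelutils/trainingutilities.py | calculate_possible_fold_sizes
-- ===== SOURCE A (Python) =====
-- def calculate_possible_fold_sizes(n_samples, k):
--     base_fold_size = n_samples // k
--     extra_samples = n_samples % k
--
--     fold_sizes = [base_fold_size] * k
--
--     for i in range(extra_samples):
--         fold_sizes[i] += 1
--
--     possible_train_sizes = set([n_samples - f for f in fold_sizes])
--     return list(possible_train_sizes)
-- ===== SOURCE B (Python) =====
-- def calculate_possible_fold_sizes(n_samples, k):
--     # Closed form: fold sizes are base and (when a remainder exists) base+1,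
--     # so the distinct train sizes are n-base and possibly n-base-1.
--     base, extra = divmod(n_samples, k)
--     train = n_samples - base
--     return [train - 1, train] if extra else [train]
-- ===== Notes on version B (the rewrite author's own statement) =====
-- stated objective: faster
-- what changed: Replaces the O(k) fold-size list, in-place increment loop and set dedup by a closed form (the distinct train sizes are n-base and, when n % k != 0, also n-base-1); Pre_ restricts to k >= 1, the natural domain of a fold count: A raises ZeroDivisionError at k = 0, and for negative k A's empty list is an artefact of list multiplication on a nonsensical input.
-- outside the precondition, e.g. on calculate_possible_fold_sizes(10, -3): A returns [], B returns [13, 14]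
import Mathlib
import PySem

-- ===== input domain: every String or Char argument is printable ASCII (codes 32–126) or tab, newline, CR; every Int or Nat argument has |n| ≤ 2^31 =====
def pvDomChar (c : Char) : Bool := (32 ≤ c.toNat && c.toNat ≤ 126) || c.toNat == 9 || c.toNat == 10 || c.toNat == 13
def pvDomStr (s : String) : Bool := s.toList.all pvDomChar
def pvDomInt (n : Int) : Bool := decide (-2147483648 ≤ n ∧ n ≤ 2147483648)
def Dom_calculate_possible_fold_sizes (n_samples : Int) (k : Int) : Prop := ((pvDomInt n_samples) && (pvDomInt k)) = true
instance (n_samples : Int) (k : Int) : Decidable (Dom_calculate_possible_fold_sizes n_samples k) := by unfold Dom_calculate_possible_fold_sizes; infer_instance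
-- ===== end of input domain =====

-- B replaces A's O(k) fold-size list + increment loop + set dedup by the closed form
-- [n-base-1, n-base] (the first entry only when n % k != 0); return-value equivalence only.

-- ===== PORT A =====
def calculate_possible_fold_sizes (n_samples : Int) (k : Int) : List Int :=
  let base_fold_size := PySem.Int.floordiv n_samples k
  let extra_samples := PySem.Int.mod n_samples k
  let fold_sizes := PySem.List.pyRepeat [base_fold_size] k
  let fold_sizes := (PySem.List.pyRange 0 extra_samples 1).foldl
      (fun fs i => PySem.List.pySetD fs i (PySem.List.pyGetD fs i 0 + 1)) fold_sizes
  PySem.Set.ofList (fold_sizes.map (fun f => n_samples - f))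

-- ===== PORT B =====
def calculate_possible_fold_sizes_alt (n_samples : Int) (k : Int) : List Int :=
  let base := PySem.Int.floordiv n_samples k
  let extra := PySem.Int.mod n_samples k
  let train := n_samples - base
  if extra ≠ 0 then [train - 1, train] else [train]

-- ===== PRECONDITION & SPEC =====
-- Pre_ restricts to the natural domain of a fold count, k ≥ 1: at k = 0 the Python A raises
-- ZeroDivisionError, and for negative k A's empty list is an artefact of list multiplication
-- on a nonsensical input (no folds exist), which B's closed form has no reason to reproduce.
def Pre_calculate_possible_fold_sizes (n_samples : Int) (k : Int) : Prop := 1 ≤ k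
instance (n_samples : Int) (k : Int) : Decidable (Pre_calculate_possible_fold_sizes n_samples k) := by unfold Pre_calculate_possible_fold_sizes; infer_instance
def pvWitness_calculate_possible_fold_sizes : Int × Int := (10, 3)

def Spec_calculate_possible_fold_sizes (n_samples : Int) (k : Int) (out : List Int) : Prop := out = calculate_possible_fold_sizes_alt n_samples k
instance (n_samples : Int) (k : Int) (out : List Int) : Decidable (Spec_calculate_possible_fold_sizes n_samples k out) := by unfold Spec_calculate_possible_fold_sizes; infer_instance

-- ===== CLAIM (what is proved, stated in full; the proofs are below) =====
def Claim_equal_calculate_possible_fold_sizes : Prop := ∀ (n_samples : Int) (k : Int), Dom_calculate_possible_fold_sizes n_samples k → Pre_calculate_possible_fold_sizes n_samples k → Spec_calculate_possible_fold_sizes n_samples k (calculate_possible_fold_sizes n_samples k)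

-- ===== LEMMAS AND PROOFS =====

-- setting the first position after a prefix of length e
lemma set_append_cons {α : Type} (l1 : List α) (a v : α) (t : List α) (n : Nat)
    (h : l1.length = n) : (l1 ++ a :: t).set n v = l1 ++ v :: t := by
  induction l1 generalizing n with
  | nil => subst h; rfl
  | cons x xs ih => subst h; simp [ih xs.length rfl]

-- the increment loop on [b]*L over range(e) yields e copies of b+1 then L-e copies of b
lemma loop_eval (b : Int) (L e : Nat) (he : e ≤ L) :
    (PySem.List.pyRange 0 (e : Int) 1).foldl
      (fun fs i => PySem.List.pySetD fs i (PySem.List.pyGetD fs i 0 + 1)) (List.replicate L b)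
    = List.replicate e (b + 1) ++ List.replicate (L - e) b := by
  induction e with
  | zero => simp [PySem.List.pyRange_one_eq_nil]
  | succ e ih =>
    have h0 : ((e : Int) + 1) = ((e + 1 : Nat) : Int) := by push_cast; ring
    have hr : PySem.List.pyRange 0 ((e + 1 : Nat) : Int) 1
        = PySem.List.pyRange 0 (e : Int) 1 ++ [(e : Int)] := by
      rw [← h0, PySem.List.pyRange_one_succ_right (by exact_mod_cast Nat.zero_le e)]
    rw [hr, List.foldl_append, ih (Nat.le_of_succ_le he)]
    have hlt : e < L := he
    have hsplit : List.replicate (L - e) b = b :: List.replicate (L - (e + 1)) b := by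
      have : L - e = (L - (e + 1)) + 1 := by omega
      rw [this, List.replicate_succ]
    rw [hsplit]
    have hget : PySem.List.pyGetD
        (List.replicate e (b + 1) ++ b :: List.replicate (L - (e + 1)) b) (e : Int) 0 = b := by
      rw [PySem.List.pyGetD_natCast]
      rw [List.getD_eq_getElem?_getD, List.getElem?_append_right (by simp)]
      simp
    simp only [List.foldl_cons, List.foldl_nil]
    rw [hget]
    rw [PySem.List.pySetD_natCast]
    rw [set_append_cons _ _ _ _ e (by simp), List.replicate_succ' (n := e) (a := b + 1)]
    simp

lemma ofList_replicate_pos (y : Int) (L : Nat) (hL : 0 < L) :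
    PySem.Set.ofList (List.replicate L y) = [y] := by
  induction L with
  | zero => omega
  | succ L ih =>
    rw [List.replicate_succ, PySem.Set.ofList_cons]
    cases L with
    | zero => rfl
    | succ m =>
      rw [ih (Nat.succ_pos m)]
      simp [PySem.Set.discard]

lemma ofList_replicate_append (x y : Int) (e m : Nat) (he : 0 < e) (hm : 0 < m) (hxy : x ≠ y) :
    PySem.Set.ofList (List.replicate e x ++ List.replicate m y) = [x, y] := by
  induction e with
  | zero => omega
  | succ e ih =>
    rw [List.replicate_succ, List.cons_append, PySem.Set.ofList_cons]
    cases e with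
    | zero =>
      simp only [List.replicate, List.nil_append]
      rw [ofList_replicate_pos y m hm]
      simp [PySem.Set.discard, Ne.symm hxy]
    | succ e' =>
      rw [ih (Nat.succ_pos e')]
      simp [PySem.Set.discard, Ne.symm hxy]

-- ===== VERDICT (by name: the statement is the Claim_ definition above) =====
theorem calculate_possible_fold_sizes_spec : Claim_equal_calculate_possible_fold_sizes := by
  intro n k _ hk
  unfold Pre_calculate_possible_fold_sizes at hk
  unfold Spec_calculate_possible_fold_sizes calculate_possible_fold_sizes calculate_possible_fold_sizes_alt
  simp only [PySem.List.pyRepeat_singleton]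
  have hpos : 0 < k := hk
  have hm0 : 0 ≤ PySem.Int.mod n k := PySem.Int.mod_nonneg n hpos
  have hmk : PySem.Int.mod n k < k := PySem.Int.mod_lt n hpos
  obtain ⟨e, hcast⟩ : ∃ e : Nat, (e : Int) = PySem.Int.mod n k :=
    ⟨_, Int.toNat_of_nonneg hm0⟩
  set b := PySem.Int.floordiv n k with hb
  have heL : e < k.toNat := by
    rw [← hcast] at hmk
    omega
  rw [← hcast, loop_eval b k.toNat e (Nat.le_of_lt heL)]
  rw [List.map_append, List.map_replicate, List.map_replicate]
  by_cases hz : PySem.Int.mod n k = 0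
  · have he0 : e = 0 := by omega
    rw [he0]
    simp only [List.replicate, List.nil_append, Nat.sub_zero]
    rw [ofList_replicate_pos (n - b) k.toNat (by omega)]
    simp
  · have he1 : 0 < e := by omega
    rw [ofList_replicate_append (n - (b + 1)) (n - b) e (k.toNat - e) he1 (by omega) (by omega)]
    have : n - (b + 1) = n - b - 1 := by ring
    rw [this]
    simp
    omega
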